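-- pv_equiv track=rewrite | github.com/cmtalleyrand/musical-tuning | musical_tuning/optimizer.py | _factor_to_semitone
-- ===== SOURCE A (Python) =====
-- _BASE_DEGREE_TO_SEMITONE = {1: 0, 2: 2, 3: 4, 4: 5, 5: 7, 6: 9, 7: 11, 8: 12, 9: 14, 10: 16, 11: 17, 12: 19, 13: 21}
--
-- def _factor_to_semitone(factor: str) -> int:
--     accidentals = 0
--     idx = 0
--     while idx < len(factor) and factor[idx] in "b#":
--         accidentals += -1 if factor[idx] == "b" else 1
--         idx += 1
--     degree = int(factor[idx:])
--     base = _BASE_DEGREE_TO_SEMITONE[degree]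
--     return base + accidentals
-- ===== SOURCE B (Python) =====
-- def _factor_to_semitone(factor: str) -> int:
--     # Recursive decomposition: peel one flat/sharp mark per call, then a closed-form
--     # diatonic formula (12 per octave, major-scale step pattern) replaces the table.
--     if factor[:1] == "b":
--         return _factor_to_semitone(factor[1:]) - 1
--     if factor[:1] == "#":
--         return _factor_to_semitone(factor[1:]) + 1
--     degree = int(factor)
--     if not 1 <= degree <= 13:
--         raise KeyError(degree)
--     q, r = divmod(degree - 1, 7)
--     return 12 * q + 2 * r - (r >= 3)
-- ===== Notes on version B (the rewrite author's own statement) =====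
-- stated objective: alternative
-- what changed: Replaces A's index-tracking while loop plus dict lookup with a recursion that peels one flat/sharp mark per call and a closed-form diatonic formula (divmod by 7, 12 semitones per octave, major-scale step pattern) instead of the _BASE_DEGREE_TO_SEMITONE table.
import Mathlib
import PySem

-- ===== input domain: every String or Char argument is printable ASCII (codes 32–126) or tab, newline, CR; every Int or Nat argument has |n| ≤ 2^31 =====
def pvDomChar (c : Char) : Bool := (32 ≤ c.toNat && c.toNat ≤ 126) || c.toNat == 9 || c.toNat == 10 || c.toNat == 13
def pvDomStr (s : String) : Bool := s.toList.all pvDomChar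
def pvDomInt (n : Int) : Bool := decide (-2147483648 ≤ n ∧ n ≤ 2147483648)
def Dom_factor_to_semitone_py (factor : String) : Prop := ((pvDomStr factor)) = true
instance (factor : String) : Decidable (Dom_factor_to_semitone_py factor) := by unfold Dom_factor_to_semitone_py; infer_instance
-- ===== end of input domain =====

-- B replaces A's index-loop-plus-table with a recursion peeling one flat/sharp mark per call
-- and a closed-form diatonic formula instead of the dict lookup (objective: alternative).

-- ===== PORT A =====
-- the module constant _BASE_DEGREE_TO_SEMITONE (used by A, as in the Python module)
def pvBaseTable : PySem.Dict Int Int :=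
  PySem.Dict.ofList [(1, 0), (2, 2), (3, 4), (4, 5), (5, 7), (6, 9), (7, 11), (8, 12), (9, 14), (10, 16), (11, 17), (12, 19), (13, 21)]

-- A's while loop: walk the chars from idx = 0 while they are flat/sharp marks, accumulating their
-- signed count; returns (that count, the remaining suffix factor[idx:]).
def pvLoopA : List Char → Int → Int × List Char
  | [], acc => (acc, [])
  | c :: rest, acc =>
    if c == 'b' || c == '#' then
      pvLoopA rest (acc + (if c == 'b' then -1 else 1))
    else
      (acc, c :: rest)

def factor_to_semitone_py (factor : String) : Int :=
  match pvLoopA factor.toList 0 with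
  | (accidentals, rest) =>
    match PySem.Int.ofChars? rest with     -- degree = int(factor[idx:]); none = ValueError, outside Pre_
    | none => 0
    | some degree =>
      match pvBaseTable.get? degree with   -- _BASE_DEGREE_TO_SEMITONE[degree]; none = KeyError, outside Pre_
      | none => 0
      | some base => base + accidentals

-- ===== PORT B =====
-- B's recursion on the string (factor[:1] tests / factor[1:] tail = head/tail of the char list),
-- ending in int(factor), the 1..13 range check (raise = outside Pre_) and the divmod closed form.
def pvAltGo : List Char → Int
  | [] =>
    0  -- int("") raises ValueError, outside Pre_
  | c :: rest =>
    if c == 'b' then pvAltGo rest - 1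
    else if c == '#' then pvAltGo rest + 1
    else
      match PySem.Int.ofChars? (c :: rest) with  -- int(factor); none = ValueError, outside Pre_
      | none => 0
      | some degree =>
        if 1 ≤ degree ∧ degree ≤ 13 then
          let q := PySem.Int.floordiv (degree - 1) 7
          let r := PySem.Int.mod (degree - 1) 7
          12 * q + 2 * r - (if 3 ≤ r then 1 else 0)
        else 0  -- raise KeyError, outside Pre_

def factor_to_semitone_py_alt (factor : String) : Int := pvAltGo factor.toList

-- ===== PRECONDITION & SPEC =====
-- Pre_: exactly the inputs where Python A returns normally — the suffix past the leading flat/sharp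
-- run parses as an int (else ValueError) that is a key of _BASE_DEGREE_TO_SEMITONE, 1..13 (else KeyError).
def Pre_factor_to_semitone_py (factor : String) : Prop :=
  (match PySem.Int.ofChars? (factor.toList.dropWhile (fun c => c == 'b' || c == '#')) with
   | none => false
   | some d => decide (1 ≤ d ∧ d ≤ 13)) = true
instance (factor : String) : Decidable (Pre_factor_to_semitone_py factor) := by unfold Pre_factor_to_semitone_py; infer_instance

def pvWitness_factor_to_semitone_py : String := "b3"

def Spec_factor_to_semitone_py (factor : String) (out : Int) : Prop := out = factor_to_semitone_py_alt factor
instance (factor : String) (out : Int) : Decidable (Spec_factor_to_semitone_py factor out) := by unfold Spec_factor_to_semitone_py; infer_instance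

-- ===== CLAIM (what is proved, stated in full; the proofs are below) =====
def Claim_equal_factor_to_semitone_py : Prop := ∀ (factor : String), Dom_factor_to_semitone_py factor → Pre_factor_to_semitone_py factor → Spec_factor_to_semitone_py factor (factor_to_semitone_py factor)

-- ===== LEMMAS AND PROOFS =====

-- A's loop = (acc + sharp-count − flat-count over the leading run, the remaining suffix)
theorem pvLoopA_eq (cs : List Char) (acc : Int) :
    pvLoopA cs acc =
      (acc + ((cs.takeWhile (fun c => c == 'b' || c == '#')).count '#' : Int)
           - ((cs.takeWhile (fun c => c == 'b' || c == '#')).count 'b' : Int),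
       cs.dropWhile (fun c => c == 'b' || c == '#')) := by
  induction cs generalizing acc with
  | nil => simp [pvLoopA]
  | cons c rest ih =>
    by_cases hb : c = 'b'
    · subst hb
      simp [pvLoopA, ih, List.takeWhile, List.dropWhile]
      ring_nf
    · by_cases hs : c = '#'
      · subst hs
        simp [pvLoopA, ih, List.takeWhile, List.dropWhile]
        ring_nf
      · have hpb : (c == 'b') = false := by simp [hb]
        have hps : (c == '#') = false := by simp [hs]
        simp [pvLoopA, List.takeWhile, List.dropWhile, hpb, hps]

-- B's recursion = its value on the suffix past the leading run, plus sharp-count − flat-count of that run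
theorem pvAltGo_eq (cs : List Char) :
    pvAltGo cs =
      pvAltGo (cs.dropWhile (fun c => c == 'b' || c == '#'))
        + ((cs.takeWhile (fun c => c == 'b' || c == '#')).count '#' : Int)
        - ((cs.takeWhile (fun c => c == 'b' || c == '#')).count 'b' : Int) := by
  induction cs with
  | nil => simp [pvAltGo]
  | cons c rest ih =>
    by_cases hb : c = 'b'
    · subst hb
      simp [pvAltGo, ih, List.takeWhile, List.dropWhile]
      ring_nf
    · by_cases hs : c = '#'
      · subst hs
        simp [pvAltGo, ih, List.takeWhile, List.dropWhile]
        ring_nf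
      · have hpb : (c == 'b') = false := by simp [hb]
        have hps : (c == '#') = false := by simp [hs]
        simp [pvAltGo, List.takeWhile, List.dropWhile, hpb, hps]

-- the dropWhile suffix starts with no flat/sharp mark, so B's recursion goes straight to the parse branch
theorem pvAltGo_parse (cs : List Char) (h : cs.dropWhile (fun c => c == 'b' || c == '#') = cs) :
    pvAltGo cs =
      match PySem.Int.ofChars? cs with
      | none => 0
      | some degree =>
        if 1 ≤ degree ∧ degree ≤ 13 then
          12 * PySem.Int.floordiv (degree - 1) 7 + 2 * PySem.Int.mod (degree - 1) 7
            - (if 3 ≤ PySem.Int.mod (degree - 1) 7 then 1 else 0)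
        else 0 := by
  cases cs with
  | nil => decide
  | cons c rest =>
    by_cases hbs : (c == 'b' || c == '#') = true
    · simp only [List.dropWhile_cons, hbs, if_true] at h
      exact absurd (congrArg List.length h) (by
        have := List.length_dropWhile_le (fun c => c == 'b' || c == '#') rest
        simp; omega)
    · have hb : (c == 'b') = false := by revert hbs; cases (c == 'b') <;> simp
      have hs : (c == '#') = false := by revert hbs; cases (c == '#') <;> simp
      simp [pvAltGo, hb, hs]

-- the closed form agrees with the table on every key 1..13
theorem pvClosed_eq_table (d : Int) (h1 : 1 ≤ d) (h2 : d ≤ 13) :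
    pvBaseTable.get? d =
      some (12 * PySem.Int.floordiv (d - 1) 7 + 2 * PySem.Int.mod (d - 1) 7
            - (if 3 ≤ PySem.Int.mod (d - 1) 7 then 1 else 0)) := by
  interval_cases d <;> decide

-- ===== VERDICT (by name: the statement is the Claim_ definition above) =====
theorem factor_to_semitone_py_spec : Claim_equal_factor_to_semitone_py := by
  intro factor _ hpre
  unfold Spec_factor_to_semitone_py factor_to_semitone_py factor_to_semitone_py_alt
  unfold Pre_factor_to_semitone_py at hpre
  rw [pvAltGo_eq, pvAltGo_parse _ (List.dropWhile_idempotent _ _)]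
  simp only [pvLoopA_eq]
  cases hof : PySem.Int.ofChars? (factor.toList.dropWhile (fun c => c == 'b' || c == '#')) with
  | none => rw [hof] at hpre; simp at hpre
  | some d =>
    rw [hof] at hpre
    simp only [decide_eq_true_eq] at hpre
    simp only [pvClosed_eq_table d hpre.1 hpre.2, if_pos hpre]
    ring
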